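-- pv_equiv track=rewrite | github.com/raph-rcn/devsecops-juice-shop | build_security_dashboard.py | mermaid_pie_from_counts
-- ===== SOURCE A (Python) =====
-- def mermaid_pie_from_counts(title:str, counts:dict):
--     lines = ['```mermaid', f'pie title {title}']
--     # stable order for readability
--     order = ["Critical","High","Medium","Low","Negligible","Unknown","Info","Informational"]
--     for k in order:
--         if counts.get(k, 0):
--             lines.append(f'  "{k}" : {counts[k]}')
--     # any other keys
--     for k, v in counts.items():
--         if k not in order and v:
--             lines.append(f'  "{k}" : {v}')
--     lines.append('```')
--     return "\n".join(lines)
-- ===== SOURCE B (Python) =====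
-- def mermaid_pie_from_counts(title:str, counts:dict):
--     order = ["Critical","High","Medium","Low","Negligible","Unknown","Info","Informational"]
--     idx = {k: i for i, k in enumerate(order)}
--     buckets = [[] for _ in range(len(order) + 1)]
--     for k, v in counts.items():
--         if v:
--             buckets[idx.get(k, len(order))].append(f'  "{k}" : {v}')
--     lines = ['```mermaid', f'pie title {title}']
--     for b in buckets:
--         lines.extend(b)
--     lines.append('```')
--     return "\n".join(lines)
-- ===== Notes on version B (the rewrite author's own statement) =====
-- stated objective: alternative
-- what changed: Instead of one pass indexing the dict by the fixed order list and a second pass over items with a 'not in order' list scan, B makes a single pass over the items, dropping each truthy entry into one of nine buckets keyed by a precomputed position dict (counting-sort by severity rank), then concatenates the buckets.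
import Mathlib
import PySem

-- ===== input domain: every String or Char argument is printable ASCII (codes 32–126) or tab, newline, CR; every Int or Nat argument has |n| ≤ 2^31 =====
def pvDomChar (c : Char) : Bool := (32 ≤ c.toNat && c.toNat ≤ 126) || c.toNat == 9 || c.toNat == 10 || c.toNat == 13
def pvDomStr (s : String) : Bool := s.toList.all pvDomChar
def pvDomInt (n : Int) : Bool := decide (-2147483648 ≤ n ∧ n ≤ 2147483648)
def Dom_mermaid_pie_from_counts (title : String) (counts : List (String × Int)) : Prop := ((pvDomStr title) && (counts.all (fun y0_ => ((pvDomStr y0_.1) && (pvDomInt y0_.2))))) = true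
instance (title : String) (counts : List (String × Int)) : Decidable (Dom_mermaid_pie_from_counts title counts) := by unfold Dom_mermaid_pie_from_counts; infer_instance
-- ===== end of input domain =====

-- ONE-LINE SUMMARY: B replaces A's order-indexed pass + 'not in order' rescan by a single
-- bucket (counting-sort) pass over the items; equal output proved on the whole domain.

-- the fixed severity order literal both Pythons contain
def pvOrder : List String :=
  ["Critical","High","Medium","Low","Negligible","Unknown","Info","Informational"]

-- the f-string '  "{k}" : {v}' both Pythons contain
def pvLine (k : String) (v : Int) : String := "  \"" ++ k ++ "\" : " ++ PySem.Int.toStr v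

-- ===== PORT A =====
def mermaid_pie_from_counts (title : String) (counts : List (String × Int)) : String :=
  -- counts : dict → normalise the association list with Python dict construction
  let d := PySem.Dict.ofList counts
  let lines : List String := ["```mermaid", "pie title " ++ title]
  -- for k in order: if counts.get(k, 0): lines.append(f'  "{k}" : {counts[k]}')
  let lines := pvOrder.foldl (fun acc k =>
      if d.getD k 0 != 0 then acc ++ [pvLine k (d.getD k 0)] else acc) lines
  -- for k, v in counts.items(): if k not in order and v: lines.append(…)
  let lines := d.items.foldl (fun acc kv =>
      if !(pvOrder.contains kv.1) && kv.2 != 0 then acc ++ [pvLine kv.1 kv.2] else acc) lines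
  PySem.Str.join "\n" (lines ++ ["```"])

-- ===== PORT B =====
-- idx = {k: i for i, k in enumerate(order)}
def pvIdxDict : PySem.Dict String Int :=
  (PySem.List.enumerate pvOrder).foldl (fun d p => d.insert p.2 p.1) PySem.Dict.empty

def mermaid_pie_from_counts_alt (title : String) (counts : List (String × Int)) : String :=
  let d := PySem.Dict.ofList counts
  -- buckets = [[] for _ in range(len(order) + 1)]
  let buckets : List (List String) := List.replicate (pvOrder.length + 1) []
  -- for k, v in counts.items(): if v: buckets[idx.get(k, len(order))].append(f'  "{k}" : {v}')
  let buckets := d.items.foldl (fun bs kv =>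
      if kv.2 != 0 then
        -- the index is a value of the literal dict idx (0..8), hence nonnegative: toNat is exact
        let j := (pvIdxDict.getD kv.1 (PySem.List.len pvOrder)).toNat
        bs.set j (bs.getD j [] ++ [pvLine kv.1 kv.2])
      else bs) buckets
  let lines : List String := ["```mermaid", "pie title " ++ title]
  -- for b in buckets: lines.extend(b)
  let lines := buckets.foldl (fun acc b => acc ++ b) lines
  PySem.Str.join "\n" (lines ++ ["```"])

-- ===== PRECONDITION & SPEC =====
def Spec_mermaid_pie_from_counts (title : String) (counts : List (String × Int)) (out : String) : Prop := out = mermaid_pie_from_counts_alt title counts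
instance (title : String) (counts : List (String × Int)) (out : String) : Decidable (Spec_mermaid_pie_from_counts title counts out) := by unfold Spec_mermaid_pie_from_counts; infer_instance

-- ===== CLAIM (what is proved, stated in full; the proofs are below) =====
def Claim_equal_mermaid_pie_from_counts : Prop := ∀ (title : String) (counts : List (String × Int)), Dom_mermaid_pie_from_counts title counts → Spec_mermaid_pie_from_counts title counts (mermaid_pie_from_counts title counts)

-- ===== LEMMAS AND PROOFS =====

def pvChain (k : String) : Int :=
  if k == "Critical" then 0 else if k == "High" then 1 else if k == "Medium" then 2
  else if k == "Low" then 3 else if k == "Negligible" then 4 else if k == "Unknown" then 5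
  else if k == "Info" then 6 else if k == "Informational" then 7 else 8

theorem pvChain_cases (k : String) :
    pvChain k = 0 ∨ pvChain k = 1 ∨ pvChain k = 2 ∨ pvChain k = 3 ∨ pvChain k = 4 ∨
    pvChain k = 5 ∨ pvChain k = 6 ∨ pvChain k = 7 ∨ pvChain k = 8 := by
  unfold pvChain; split_ifs <;> simp

theorem pvIdx_eq (k : String) : pvIdxDict.getD k 8 = pvChain k := by
  simp [pvIdxDict, pvOrder, PySem.List.enumerate, PySem.Dict.getD_insert, pvChain]
  split_ifs <;> simp_all

def pvBucket (i : Nat) (l : List (String × Int)) : List String :=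
  (l.filter (fun p => ((pvIdxDict.getD p.1 8).toNat == i) && p.2 != 0)).map
    (fun p => pvLine p.1 p.2)

def pvStepB (bs : List (List String)) (kv : String × Int) : List (List String) :=
  if kv.2 != 0 then
    let j := (pvIdxDict.getD kv.1 (PySem.List.len pvOrder)).toNat
    bs.set j (bs.getD j [] ++ [pvLine kv.1 kv.2])
  else bs

theorem pvBfold (l : List (String × Int)) (b0 b1 b2 b3 b4 b5 b6 b7 b8 : List String) :
    l.foldl pvStepB [b0,b1,b2,b3,b4,b5,b6,b7,b8]
    = [b0 ++ pvBucket 0 l, b1 ++ pvBucket 1 l, b2 ++ pvBucket 2 l, b3 ++ pvBucket 3 l,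
       b4 ++ pvBucket 4 l, b5 ++ pvBucket 5 l, b6 ++ pvBucket 6 l, b7 ++ pvBucket 7 l,
       b8 ++ pvBucket 8 l] := by
  induction l generalizing b0 b1 b2 b3 b4 b5 b6 b7 b8 with
  | nil => simp [pvBucket]
  | cons x l ih =>
    by_cases hv : x.2 = 0
    · have h0 : pvStepB [b0,b1,b2,b3,b4,b5,b6,b7,b8] x = [b0,b1,b2,b3,b4,b5,b6,b7,b8] := by
        unfold pvStepB; rw [if_neg (by simp [hv])]
      rw [List.foldl_cons, h0, ih]
      simp [pvBucket, List.filter_cons, hv]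
    · have hx2 : (x.2 != 0) = true := by simp [hv]
      have hj : pvIdxDict.getD x.1 (PySem.List.len pvOrder) = pvChain x.1 := by
        rw [show PySem.List.len pvOrder = (8:Int) from by decide, pvIdx_eq]
      rcases pvChain_cases x.1 with hc|hc|hc|hc|hc|hc|hc|hc|hc
      · have h0 : pvStepB [b0,b1,b2,b3,b4,b5,b6,b7,b8] x = [b0 ++ [pvLine x.1 x.2], b1, b2, b3, b4, b5, b6, b7, b8] := by
          unfold pvStepB; rw [if_pos hx2, hj, hc]; rfl
        rw [List.foldl_cons, h0, ih]
        simp [pvBucket, List.filter_cons, pvIdx_eq, hc, hv, List.append_assoc]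
      · have h0 : pvStepB [b0,b1,b2,b3,b4,b5,b6,b7,b8] x = [b0, b1 ++ [pvLine x.1 x.2], b2, b3, b4, b5, b6, b7, b8] := by
          unfold pvStepB; rw [if_pos hx2, hj, hc]; rfl
        rw [List.foldl_cons, h0, ih]
        simp [pvBucket, List.filter_cons, pvIdx_eq, hc, hv, List.append_assoc]
      · have h0 : pvStepB [b0,b1,b2,b3,b4,b5,b6,b7,b8] x = [b0, b1, b2 ++ [pvLine x.1 x.2], b3, b4, b5, b6, b7, b8] := by
          unfold pvStepB; rw [if_pos hx2, hj, hc]; rfl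
        rw [List.foldl_cons, h0, ih]
        simp [pvBucket, List.filter_cons, pvIdx_eq, hc, hv, List.append_assoc]
      · have h0 : pvStepB [b0,b1,b2,b3,b4,b5,b6,b7,b8] x = [b0, b1, b2, b3 ++ [pvLine x.1 x.2], b4, b5, b6, b7, b8] := by
          unfold pvStepB; rw [if_pos hx2, hj, hc]; rfl
        rw [List.foldl_cons, h0, ih]
        simp [pvBucket, List.filter_cons, pvIdx_eq, hc, hv, List.append_assoc]
      · have h0 : pvStepB [b0,b1,b2,b3,b4,b5,b6,b7,b8] x = [b0, b1, b2, b3, b4 ++ [pvLine x.1 x.2], b5, b6, b7, b8] := by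
          unfold pvStepB; rw [if_pos hx2, hj, hc]; rfl
        rw [List.foldl_cons, h0, ih]
        simp [pvBucket, List.filter_cons, pvIdx_eq, hc, hv, List.append_assoc]
      · have h0 : pvStepB [b0,b1,b2,b3,b4,b5,b6,b7,b8] x = [b0, b1, b2, b3, b4, b5 ++ [pvLine x.1 x.2], b6, b7, b8] := by
          unfold pvStepB; rw [if_pos hx2, hj, hc]; rfl
        rw [List.foldl_cons, h0, ih]
        simp [pvBucket, List.filter_cons, pvIdx_eq, hc, hv, List.append_assoc]
      · have h0 : pvStepB [b0,b1,b2,b3,b4,b5,b6,b7,b8] x = [b0, b1, b2, b3, b4, b5, b6 ++ [pvLine x.1 x.2], b7, b8] := by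
          unfold pvStepB; rw [if_pos hx2, hj, hc]; rfl
        rw [List.foldl_cons, h0, ih]
        simp [pvBucket, List.filter_cons, pvIdx_eq, hc, hv, List.append_assoc]
      · have h0 : pvStepB [b0,b1,b2,b3,b4,b5,b6,b7,b8] x = [b0, b1, b2, b3, b4, b5, b6, b7 ++ [pvLine x.1 x.2], b8] := by
          unfold pvStepB; rw [if_pos hx2, hj, hc]; rfl
        rw [List.foldl_cons, h0, ih]
        simp [pvBucket, List.filter_cons, pvIdx_eq, hc, hv, List.append_assoc]
      · have h0 : pvStepB [b0,b1,b2,b3,b4,b5,b6,b7,b8] x = [b0, b1, b2, b3, b4, b5, b6, b7, b8 ++ [pvLine x.1 x.2]] := by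
          unfold pvStepB; rw [if_pos hx2, hj, hc]; rfl
        rw [List.foldl_cons, h0, ih]
        simp [pvBucket, List.filter_cons, pvIdx_eq, hc, hv, List.append_assoc]

theorem pvMapFilter {α β : Type} (p : α → Bool) (f : α → β) (l : List α) :
    (l.filter p).map f = l.flatMap (fun x => if p x then [f x] else []) := by
  induction l with
  | nil => simp
  | cons x l ih => simp only [List.filter_cons, List.flatMap_cons]; split <;> simp [ih]

theorem pvKeyFilter (l : List (String × Int)) (hnd : (l.map Prod.fst).Nodup) (k : String) :
    (l.filter (fun p => p.1 == k && p.2 != 0)).map (fun p => pvLine p.1 p.2)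
    = if (PySem.Dict.mk l).getD k 0 != 0 then [pvLine k ((PySem.Dict.mk l).getD k 0)] else [] := by
  induction l with
  | nil => simp [PySem.Dict.getD_eq_get?_getD, PySem.Dict.get?]
  | cons x l ih =>
    simp only [List.map_cons, List.nodup_cons] at hnd
    rw [PySem.Dict.getD_eq_get?_getD, PySem.Dict.get?_mk_cons]
    by_cases hk : x.1 == k
    · have hkk : x.1 = k := by simpa using hk
      have htail : l.filter (fun p => p.1 == k && p.2 != 0) = [] := by
        rw [List.filter_eq_nil_iff]
        intro p hp
        have : p.1 ∈ l.map Prod.fst := List.mem_map_of_mem hp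
        by_cases h : p.1 = k
        · exact absurd (h ▸ this) (hkk ▸ hnd.1)
        · simp [h]
      by_cases hv : x.2 = 0 <;>
        simp [List.filter_cons, hk, hkk, hv, htail]
    · rw [if_neg hk]
      simp only [List.filter_cons, hk, Bool.false_and, if_neg Bool.false_ne_true]
      rw [ih hnd.2, PySem.Dict.getD_eq_get?_getD]

theorem pvPred0 (s : String) : ((pvIdxDict.getD s 8).toNat == (0:Nat)) = (s == "Critical") := by
  rw [pvIdx_eq]; unfold pvChain; split_ifs <;> simp_all

theorem pvPred1 (s : String) : ((pvIdxDict.getD s 8).toNat == (1:Nat)) = (s == "High") := by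
  rw [pvIdx_eq]; unfold pvChain; split_ifs <;> simp_all

theorem pvPred2 (s : String) : ((pvIdxDict.getD s 8).toNat == (2:Nat)) = (s == "Medium") := by
  rw [pvIdx_eq]; unfold pvChain; split_ifs <;> simp_all

theorem pvPred3 (s : String) : ((pvIdxDict.getD s 8).toNat == (3:Nat)) = (s == "Low") := by
  rw [pvIdx_eq]; unfold pvChain; split_ifs <;> simp_all

theorem pvPred4 (s : String) : ((pvIdxDict.getD s 8).toNat == (4:Nat)) = (s == "Negligible") := by
  rw [pvIdx_eq]; unfold pvChain; split_ifs <;> simp_all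

theorem pvPred5 (s : String) : ((pvIdxDict.getD s 8).toNat == (5:Nat)) = (s == "Unknown") := by
  rw [pvIdx_eq]; unfold pvChain; split_ifs <;> simp_all

theorem pvPred6 (s : String) : ((pvIdxDict.getD s 8).toNat == (6:Nat)) = (s == "Info") := by
  rw [pvIdx_eq]; unfold pvChain; split_ifs <;> simp_all

theorem pvPred7 (s : String) : ((pvIdxDict.getD s 8).toNat == (7:Nat)) = (s == "Informational") := by
  rw [pvIdx_eq]; unfold pvChain; split_ifs <;> simp_all

theorem pvPred8 (s : String) : ((pvIdxDict.getD s 8).toNat == (8:Nat)) = !(pvOrder.contains s) := by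
  rw [pvIdx_eq]; unfold pvChain; split_ifs <;> simp_all [pvOrder]

theorem pvMain (title : String) (counts : List (String × Int)) :
    mermaid_pie_from_counts title counts = mermaid_pie_from_counts_alt title counts := by
  unfold mermaid_pie_from_counts mermaid_pie_from_counts_alt
  dsimp only
  set d := PySem.Dict.ofList counts with hd
  have hnd : (d.items.map Prod.fst).Nodup := by
    have := PySem.Dict.nodup_keys_ofList (κ := String) (ν := Int) counts
    simpa [PySem.Dict.keys, hd] using this
  have heta : PySem.Dict.mk d.items = d := rfl
  -- B side: replicate → literal, fold → pvBfold, extend-fold → appends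
  have hrepl : List.replicate (pvOrder.length + 1) ([] : List String)
      = [[],[],[],[],[],[],[],[],[]] := by decide
  have hstep : (fun (bs : List (List String)) (kv : String × Int) =>
      if kv.2 != 0 then
        let j := (pvIdxDict.getD kv.1 (PySem.List.len pvOrder)).toNat
        bs.set j (bs.getD j [] ++ [pvLine kv.1 kv.2])
      else bs) = pvStepB := rfl
  rw [hrepl, hstep, pvBfold]
  -- A side: both loops become filters
  rw [PySem.List.foldl_append_if (fun k => d.getD k 0 != 0) (fun k => pvLine k (d.getD k 0))]
  rw [PySem.List.foldl_append_if (fun kv : String × Int => !(pvOrder.contains kv.1) && kv.2 != 0)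
        (fun kv : String × Int => pvLine kv.1 kv.2)]
  rw [pvMapFilter]
  -- identify each order key's block with its bucket
  have hb : ∀ i : Nat, ∀ k : String,
      (∀ s : String, ((pvIdxDict.getD s 8).toNat == i) = (s == k)) →
      pvBucket i d.items = (if d.getD k 0 != 0 then [pvLine k (d.getD k 0)] else []) := by
    intro i k hpred
    unfold pvBucket
    rw [List.filter_congr (fun p _ => by rw [hpred p.1]), pvKeyFilter d.items hnd k, heta]
  have h0 := hb 0 "Critical" pvPred0
  have h1 := hb 1 "High" pvPred1
  have h2 := hb 2 "Medium" pvPred2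
  have h3 := hb 3 "Low" pvPred3
  have h4 := hb 4 "Negligible" pvPred4
  have h5 := hb 5 "Unknown" pvPred5
  have h6 := hb 6 "Info" pvPred6
  have h7 := hb 7 "Informational" pvPred7
  have h8 : pvBucket 8 d.items
      = (d.items.filter (fun kv => !(pvOrder.contains kv.1) && kv.2 != 0)).map
          (fun kv => pvLine kv.1 kv.2) := by
    unfold pvBucket
    rw [List.filter_congr (fun p _ => by rw [pvPred8 p.1])]
  simp only [List.foldl_cons, List.foldl_nil, List.nil_append, h0, h1, h2, h3, h4, h5, h6, h7, h8]
  simp [pvOrder, List.flatMap, List.append_assoc]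

-- ===== VERDICT (by name: the statement is the Claim_ definition above) =====
theorem mermaid_pie_from_counts_spec : Claim_equal_mermaid_pie_from_counts := by
  intro title counts _
  unfold Spec_mermaid_pie_from_counts
  exact pvMain title counts
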